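-- pv_equiv track=rewrite | github.com/polimalo2187/HADES-ALPHA- | app/miniapp/service.py | _billing_steps_for_order
-- ===== SOURCE A (Python) =====
-- from typing import Any, Dict, Iterable, List, Optional
--
-- def _billing_steps_for_order(order: Optional[Dict[str, Any]]) -> List[Dict[str, Any]]:
--     steps = [
--         {"key": "created", "label": "Orden", "state": "done" if order else "upcoming"},
--         {"key": "fund", "label": "Enviar monto", "state": "upcoming"},
--         {"key": "verify", "label": "Verificación", "state": "upcoming"},
--         {"key": "activate", "label": "Activación", "state": "upcoming"},
--     ]
--     if not order:
--         return steps
--     status = str(order.get("status") or "awaiting_payment").lower().strip()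
--     if status == "awaiting_payment":
--         steps[1]["state"] = "current"
--     elif status == "verification_in_progress":
--         steps[1]["state"] = "done"
--         steps[2]["state"] = "current"
--     elif status == "paid_unconfirmed":
--         steps[1]["state"] = "done"
--         steps[2]["state"] = "current"
--     elif status == "completed":
--         for item in steps[1:]:
--             item["state"] = "done"
--         steps[3]["state"] = "done"
--     elif status in {"cancelled", "expired"}:
--         steps[1]["state"] = "blocked"
--     return steps
-- ===== SOURCE B (Python) =====
-- from typing import Any, Dict, List, Optional
--
-- _STEP_KEYS = [("created", "Orden"), ("fund", "Enviar monto"),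
--               ("verify", "Verificación"), ("activate", "Activación")]
--
-- _STATE_TABLE = {
--     "awaiting_payment": ("current", "upcoming", "upcoming"),
--     "verification_in_progress": ("done", "current", "upcoming"),
--     "paid_unconfirmed": ("done", "current", "upcoming"),
--     "completed": ("done", "done", "done"),
--     "cancelled": ("blocked", "upcoming", "upcoming"),
--     "expired": ("blocked", "upcoming", "upcoming"),
-- }
--
-- def _billing_steps_for_order(order: Optional[Dict[str, Any]]) -> List[Dict[str, Any]]:
--     if not order:
--         states = ("upcoming", "upcoming", "upcoming", "upcoming")
--     else:
--         status = str(order.get("status") or "awaiting_payment").lower().strip()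
--         states = ("done",) + _STATE_TABLE.get(status, ("upcoming", "upcoming", "upcoming"))
--     return [{"key": k, "label": lbl, "state": st}
--             for (k, lbl), st in zip(_STEP_KEYS, states)]
-- ===== Notes on version B (the rewrite author's own statement) =====
-- stated objective: idiomatic
-- what changed: Replaces the if/elif dispatch that mutates a pre-built step list with a status->state-triple lookup table plus one uniform zip construction of the four step dicts.
import Mathlib
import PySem

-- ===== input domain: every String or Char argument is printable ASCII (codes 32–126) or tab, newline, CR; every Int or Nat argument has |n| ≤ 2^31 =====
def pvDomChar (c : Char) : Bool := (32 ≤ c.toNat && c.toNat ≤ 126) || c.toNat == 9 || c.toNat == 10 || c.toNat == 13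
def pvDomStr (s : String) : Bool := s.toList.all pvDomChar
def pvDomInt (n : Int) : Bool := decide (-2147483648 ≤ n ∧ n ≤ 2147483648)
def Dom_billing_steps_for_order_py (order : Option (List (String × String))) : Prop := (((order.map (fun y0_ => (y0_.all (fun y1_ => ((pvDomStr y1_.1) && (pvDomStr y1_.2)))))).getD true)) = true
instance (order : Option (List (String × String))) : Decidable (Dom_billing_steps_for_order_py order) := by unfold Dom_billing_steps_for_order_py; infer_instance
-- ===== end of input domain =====

-- B replaces A's if/elif chain that mutates a pre-built step list with a status → state-triple
-- lookup table and one uniform zip construction (objective: more idiomatic; same O(1) cost).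

-- shared helper: the normalized status, 'str(order.get("status") or "awaiting_payment").lower().strip()'
-- (the identical Python expression appears in A and in B)
def pvStatusOf (d : List (String × String)) : String :=
  PySem.Str.strip (PySem.Str.lower
    (match (PySem.Dict.ofList d).get? "status" with
     | some s => if s = "" then "awaiting_payment" else s   -- 'or': empty string is falsy
     | none => "awaiting_payment"))

-- ===== PORT A =====
-- steps[i]["state"] = v
def pvSetState (steps : List (List (String × String))) (i : Nat) (v : String) :
    List (List (String × String)) :=
  steps.set i ((PySem.Dict.insert (PySem.Dict.mk (steps.getD i [])) "state" v).items)

def billing_steps_for_order_py (order : Option (List (String × String))) :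
    List (List (String × String)) :=
  let truthy : Bool := match order with | none => false | some d => !(d.isEmpty)
  let steps : List (List (String × String)) :=
    [[("key", "created"), ("label", "Orden"), ("state", if truthy then "done" else "upcoming")],
     [("key", "fund"), ("label", "Enviar monto"), ("state", "upcoming")],
     [("key", "verify"), ("label", "Verificación"), ("state", "upcoming")],
     [("key", "activate"), ("label", "Activación"), ("state", "upcoming")]]
  if truthy = false then steps
  else
    let status := pvStatusOf (order.getD [])
    if status = "awaiting_payment" then
      pvSetState steps 1 "current"
    else if status = "verification_in_progress" then
      pvSetState (pvSetState steps 1 "done") 2 "current"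
    else if status = "paid_unconfirmed" then
      pvSetState (pvSetState steps 1 "done") 2 "current"
    else if status = "completed" then
      -- 'for item in steps[1:]: item["state"] = "done"' then 'steps[3]["state"] = "done"'
      pvSetState ([1, 2, 3].foldl (fun st i => pvSetState st i "done") steps) 3 "done"
    else if status = "cancelled" ∨ status = "expired" then
      pvSetState steps 1 "blocked"
    else steps

-- ===== PORT B =====
def pvStepKeys : List (String × String) :=
  [("created", "Orden"), ("fund", "Enviar monto"),
   ("verify", "Verificación"), ("activate", "Activación")]

def pvStateTable : PySem.Dict String (String × String × String) :=
  PySem.Dict.ofList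
    [("awaiting_payment", ("current", "upcoming", "upcoming")),
     ("verification_in_progress", ("done", "current", "upcoming")),
     ("paid_unconfirmed", ("done", "current", "upcoming")),
     ("completed", ("done", "done", "done")),
     ("cancelled", ("blocked", "upcoming", "upcoming")),
     ("expired", ("blocked", "upcoming", "upcoming"))]

def billing_steps_for_order_py_alt (order : Option (List (String × String))) :
    List (List (String × String)) :=
  let states : List String :=
    match order with
    | none => ["upcoming", "upcoming", "upcoming", "upcoming"]
    | some d =>
      if d.isEmpty then ["upcoming", "upcoming", "upcoming", "upcoming"]
      else
        let t := pvStateTable.getD (pvStatusOf d) ("upcoming", "upcoming", "upcoming")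
        ["done", t.1, t.2.1, t.2.2]
  (pvStepKeys.zip states).map (fun p => [("key", p.1.1), ("label", p.1.2), ("state", p.2)])

-- ===== PRECONDITION & SPEC =====
def Spec_billing_steps_for_order_py (order : Option (List (String × String))) (out : List (List (String × String))) : Prop := out = billing_steps_for_order_py_alt order
instance (order : Option (List (String × String))) (out : List (List (String × String))) : Decidable (Spec_billing_steps_for_order_py order out) := by unfold Spec_billing_steps_for_order_py; infer_instance

-- ===== CLAIM (what is proved, stated in full; the proofs are below) =====
def Claim_equal_billing_steps_for_order_py : Prop := ∀ (order : Option (List (String × String))), Dom_billing_steps_for_order_py order → Spec_billing_steps_for_order_py order (billing_steps_for_order_py order)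

-- ===== LEMMAS AND PROOFS =====

theorem pv_core (d : List (String × String)) (hd : d.isEmpty = false) :
    billing_steps_for_order_py (some d) = billing_steps_for_order_py_alt (some d) := by
  unfold billing_steps_for_order_py billing_steps_for_order_py_alt
  simp only [hd, Option.getD_some, Bool.not_false, reduceIte]
  generalize pvStatusOf d = s
  by_cases h1 : s = "awaiting_payment"; · subst h1; decide
  by_cases h2 : s = "verification_in_progress"; · subst h2; decide
  by_cases h3 : s = "paid_unconfirmed"; · subst h3; decide
  by_cases h4 : s = "completed"; · subst h4; decide
  by_cases h5 : s = "cancelled"; · subst h5; decide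
  by_cases h6 : s = "expired"; · subst h6; decide
  simp only [if_neg h1, if_neg h2, if_neg h3, if_neg h4,
    if_neg (by tauto : ¬ (s = "cancelled" ∨ s = "expired"))]
  have hget : pvStateTable.get? s = none := by
    have htab : pvStateTable = PySem.Dict.mk
        [("awaiting_payment", ("current", "upcoming", "upcoming")),
         ("verification_in_progress", ("done", "current", "upcoming")),
         ("paid_unconfirmed", ("done", "current", "upcoming")),
         ("completed", ("done", "done", "done")),
         ("cancelled", ("blocked", "upcoming", "upcoming")),
         ("expired", ("blocked", "upcoming", "upcoming"))] := by decide
    rw [htab]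
    simp [PySem.Dict.get?, beq_iff_eq,
      Ne.symm h1, Ne.symm h2, Ne.symm h3, Ne.symm h4, Ne.symm h5, Ne.symm h6]
  simp [PySem.Dict.getD_eq_get?_getD, hget, pvStepKeys]

-- ===== VERDICT (by name: the statement is the Claim_ definition above) =====
theorem billing_steps_for_order_py_spec : Claim_equal_billing_steps_for_order_py := by
  intro order _
  unfold Spec_billing_steps_for_order_py
  match order with
  | none => decide
  | some d =>
    by_cases hd : d.isEmpty
    · have : d = [] := by simpa [List.isEmpty_iff] using hd
      subst this; decide
    · exact pv_core d (by simpa using hd)
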